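-- pv_equiv track=rewrite | github.com/thetawavez/vaelweb | vael_web_interface_final/vael_web_deploy_final/src/entities/twinflame/__init__.py | _detect_naming_pattern
-- ===== SOURCE A (Python) =====
-- from typing import Dict, List, Any, Optional, Callable, Union, Tuple
--
-- def _detect_naming_pattern(keys) -> Optional[str]: # Added Optional return type
--     """Detect naming patterns in keys.
--
--     Args:
--         keys: Keys to analyze
--
--     Returns:
--         Detected pattern description or None
--     """
--     keys = list(keys)
--     if not keys: return None # Handle empty keys
--
--     # Check for numeric sequence
--     if all(isinstance(k, (int, float)) or (isinstance(k, str) and k.isdigit()) for k in keys):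
--         return "Numeric sequence"
--
--     # Check for prefixes
--     if all(isinstance(k, str) for k in keys):
--         # Find common prefixes
--         prefixes = {}
--         for key in keys:
--             for i in range(1, len(key) // 2 + 1):
--                 prefix = key[:i]
--                 if prefix not in prefixes:
--                     prefixes[prefix] = 0
--                 prefixes[prefix] += 1
--
--         # Find most common prefix with significant usage
--         common_prefixes = [p for p, count in prefixes.items() if count > len(keys) / 2.0] # Ensure float division
--         if common_prefixes:
--             return f"Common prefix: {max(common_prefixes, key=len)}"
--
--     return None
-- ===== SOURCE B (Python) =====
-- def _detect_naming_pattern(keys):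
--     """Same result as A: per-length majority scan instead of one dict of all prefixes.
--
--     For each candidate prefix length L there can be at most one prefix shared by
--     more than half of the keys, so it suffices to find, level by level, that
--     majority prefix and keep the deepest one found.
--     """
--     keys = list(keys)
--     if not keys:
--         return None
--     if all(isinstance(k, (int, float)) or (isinstance(k, str) and k.isdigit()) for k in keys):
--         return "Numeric sequence"
--     if not all(isinstance(k, str) for k in keys):
--         return None
--     n = len(keys)
--     max_l = max(len(k) // 2 for k in keys)
--     best = None
--     for level in range(1, max_l + 1):
--         counts = {}
--         for k in keys:
--             if len(k) // 2 >= level: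
--                 p = k[:level]
--                 counts[p] = counts.get(p, 0) + 1
--         for p, c in counts.items():
--             if 2 * c > n:
--                 best = p
--                 break
--     return f"Common prefix: {best}" if best is not None else None
-- ===== Notes on version B (the rewrite author's own statement) =====
-- stated objective: alternative
-- what changed: Instead of building one dictionary of every half-length prefix of every key and then filtering and taking the longest by max(key=len), B scans prefix lengths level by level, uses the fact that at each length at most one prefix can be shared by more than half the keys, and keeps the deepest per-level majority prefix.
import Mathlib
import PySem

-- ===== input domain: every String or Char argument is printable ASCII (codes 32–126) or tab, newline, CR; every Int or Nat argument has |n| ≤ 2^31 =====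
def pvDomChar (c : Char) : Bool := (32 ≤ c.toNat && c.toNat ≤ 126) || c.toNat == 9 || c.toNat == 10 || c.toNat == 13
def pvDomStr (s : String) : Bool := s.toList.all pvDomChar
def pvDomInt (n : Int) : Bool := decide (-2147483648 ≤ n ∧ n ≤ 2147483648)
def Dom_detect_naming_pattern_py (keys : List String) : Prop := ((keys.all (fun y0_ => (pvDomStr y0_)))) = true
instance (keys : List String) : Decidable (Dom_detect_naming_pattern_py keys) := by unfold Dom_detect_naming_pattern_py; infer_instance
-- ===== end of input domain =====

-- B replaces A's single dictionary of all half-length prefixes (then filter + max-by-len) by a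
-- per-length majority scan that keeps the deepest majority prefix; objective: alternative algorithm.

-- ===== PORT A =====
-- Port of A. On List String the isinstance checks reduce: the numeric branch is `all k.isdigit()`
-- and the all-str guard is True. `count > len(keys)/2.0` is ported as `2*count > len(keys)`,
-- exact for ints below 2^53 (division by 2.0 and the comparison are exact in floats there).
def detect_naming_pattern_py (keys : List String) : Option String :=
  if keys = [] then none
  else if keys.all (fun k => PySem.Str.strIsdigit k) then some "Numeric sequence"
  else
    let prefixes : PySem.Dict String Int :=
      keys.foldl (fun d key =>
        (PySem.List.pyRange 1 (PySem.Int.floordiv (PySem.Str.len key) 2 + 1)).foldl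
          (fun d i =>
            let pre := PySem.Str.slice key none (some i)
            let d := if d.contains pre then d else d.insert pre 0
            d.insert pre (d.getD pre 0 + 1)) d)
        PySem.Dict.empty
    let common_prefixes : List String :=
      (prefixes.items.filter (fun pc => 2 * pc.2 > (keys.length : Int))).map (fun pc => pc.1)
    if common_prefixes ≠ [] then
      -- Python's max(...) is guarded by the nonemptiness test, so the none branch is unreachable
      match PySem.List.max? common_prefixes (fun p => PySem.Str.len p) with
      | some m => some (PySem.Str.join "" ["Common prefix: ", m])
      | none => none
    else none

-- ===== PORT B =====
def detect_naming_pattern_py_alt (keys : List String) : Option String :=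
  if keys = [] then none
  else if keys.all (fun k => PySem.Str.strIsdigit k) then some "Numeric sequence"
  else
    let n : Int := keys.length
    -- keys ≠ [] in this branch, so Python's max(...) gets a nonempty list; .getD 0 only totalizes
    let maxL : Int :=
      (PySem.List.max? (keys.map (fun k => PySem.Int.floordiv (PySem.Str.len k) 2)) (fun x => x)).getD 0
    let best : Option String :=
      (PySem.List.pyRange 1 (maxL + 1)).foldl (fun best level =>
        let counts : PySem.Dict String Int :=
          keys.foldl (fun d k =>
            if level ≤ PySem.Int.floordiv (PySem.Str.len k) 2 then
              let p := PySem.Str.slice k none (some level)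
              d.insert p (d.getD p 0 + 1)
            else d) PySem.Dict.empty
        -- the for-break over counts.items
        match counts.items.find? (fun pc => 2 * pc.2 > n) with
        | some pc => some pc.1
        | none => best) none
    match best with
    | some p => some (PySem.Str.join "" ["Common prefix: ", p])
    | none => none

-- ===== PRECONDITION & SPEC =====
def Spec_detect_naming_pattern_py (keys : List String) (out : Option String) : Prop := out = detect_naming_pattern_py_alt keys
instance (keys : List String) (out : Option String) : Decidable (Spec_detect_naming_pattern_py keys out) := by unfold Spec_detect_naming_pattern_py; infer_instance

-- ===== CLAIM (what is proved, stated in full; the proofs are below) =====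
def Claim_equal_detect_naming_pattern_py : Prop := ∀ (keys : List String), Dom_detect_naming_pattern_py keys → Spec_detect_naming_pattern_py keys (detect_naming_pattern_py keys)

-- ===== LEMMAS AND PROOFS =====

-- proof-side abbreviations
def pvHalf (k : String) : Nat := k.toList.length / 2
def pvPrefs (k : String) : List String :=
  (PySem.List.pyRange 1 ((pvHalf k : Int) + 1)).map (fun i => PySem.Str.slice k none (some i))
def pvAll (keys : List String) : List String := keys.flatMap pvPrefs
def pvCnt (keys : List String) (p : String) : Nat :=
  keys.countP (fun k => decide (p.toList.length ≤ pvHalf k) && decide (p.toList <+: k.toList))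
def pvLvl (keys : List String) (L : Int) : List String :=
  keys.filterMap (fun k =>
    if L ≤ (pvHalf k : Int) then some (PySem.Str.slice k none (some L)) else none)

-- basic bridges
lemma pv_floordiv (k : String) : PySem.Int.floordiv (PySem.Str.len k) 2 = (pvHalf k : Int) := by
  rw [PySem.Str.len_eq]
  exact_mod_cast PySem.Int.floordiv_natCast k.toList.length 2

lemma pv_slice_toList (k : String) (i : Int) (hi : 0 ≤ i) :
    (PySem.Str.slice k none (some i)).toList = k.toList.take i.toNat := by
  simp [PySem.Str.toList_slice, PySem.Chars.slice_eq_listSlice, PySem.List.slice_to _ hi]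

lemma pv_slice_len (k : String) (i : Int) (h1 : 0 ≤ i) (h2 : i.toNat ≤ pvHalf k) :
    (PySem.Str.slice k none (some i)).toList.length = i.toNat := by
  rw [pv_slice_toList k i h1, List.length_take]
  have : pvHalf k ≤ k.toList.length := Nat.div_le_self _ _
  omega

lemma pv_mem_prefs (k p : String) :
    p ∈ pvPrefs k ↔ 1 ≤ p.toList.length ∧ p.toList.length ≤ pvHalf k ∧ p.toList <+: k.toList := by
  unfold pvPrefs
  simp only [List.mem_map, PySem.List.mem_pyRange_one]
  constructor
  · rintro ⟨i, ⟨hi1, hi2⟩, rfl⟩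
    have h0 : (0:Int) ≤ i := by omega
    have hle : i.toNat ≤ pvHalf k := by omega
    have hlen := pv_slice_len k i h0 hle
    refine ⟨by omega, by omega, ?_⟩
    rw [pv_slice_toList k i h0]
    exact List.take_prefix _ _
  · rintro ⟨h1, h2, h3⟩
    refine ⟨(p.toList.length : Int), ⟨by exact_mod_cast h1, by exact_mod_cast (by omega : (p.toList.length:Int) < (pvHalf k:Int) + 1)⟩, ?_⟩
    rw [← String.toList_inj, pv_slice_toList k _ (by positivity)]
    simp only [Int.toNat_natCast]
    exact (List.prefix_iff_eq_take.mp h3).symm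

lemma pv_nodup_prefs (k : String) : (pvPrefs k).Nodup := by
  unfold pvPrefs
  refine List.Nodup.map_on ?_ (PySem.List.nodup_pyRange_one _ _)
  intro x hx y hy hxy
  simp only [PySem.List.mem_pyRange_one] at hx hy
  have hx0 : (0:Int) ≤ x := by omega
  have hy0 : (0:Int) ≤ y := by omega
  have h1 := pv_slice_len k x hx0 (by omega)
  have h2 := pv_slice_len k y hy0 (by omega)
  rw [hxy] at h1
  omega

lemma pv_count_prefs (k p : String) :
    (pvPrefs k).count p
      = if 1 ≤ p.toList.length ∧ p.toList.length ≤ pvHalf k ∧ p.toList <+: k.toList then 1 else 0 := by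
  split_ifs with h
  · exact List.count_eq_one_of_mem (pv_nodup_prefs k) ((pv_mem_prefs k p).mpr h)
  · exact List.count_eq_zero.mpr (fun hm => h ((pv_mem_prefs k p).mp hm))

lemma pv_count_all (keys : List String) (p : String) (hp : 1 ≤ p.toList.length) :
    (pvAll keys).count p = pvCnt keys p := by
  unfold pvAll pvCnt
  rw [List.count_flatMap]
  induction keys with
  | nil => simp
  | cons k ks ih =>
    simp only [List.map_cons, List.sum_cons, List.countP_cons, Function.comp_apply, ih,
      pv_count_prefs k p]
    by_cases hcond : p.toList.length ≤ pvHalf k ∧ p.toList <+: k.toList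
    · rw [if_pos ⟨hp, hcond.1, hcond.2⟩,
        if_pos (by rw [Bool.and_eq_true]; exact ⟨decide_eq_true hcond.1, decide_eq_true hcond.2⟩)]
      omega
    · rw [if_neg (by tauto),
        if_neg (by simp only [Bool.and_eq_true, decide_eq_true_eq]; tauto)]
      omega

lemma pv_mem_all (keys : List String) (p : String) (hp : 1 ≤ p.toList.length) :
    p ∈ pvAll keys ↔ 1 ≤ pvCnt keys p := by
  rw [← List.count_pos_iff, pv_count_all keys p hp]
  omega

-- disjoint counting
lemma pv_countP_disjoint {α : Type} (f g : α → Bool) (l : List α)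
    (h : ∀ x ∈ l, ¬(f x = true ∧ g x = true)) :
    l.countP f + l.countP g ≤ l.length := by
  induction l with
  | nil => simp
  | cons x xs ih =>
    have hx := h x (List.mem_cons_self ..)
    have hxs := ih (fun y hy => h y (List.mem_cons_of_mem _ hy))
    simp only [List.countP_cons, List.length_cons]
    by_cases hf : f x = true <;> by_cases hg : g x = true <;> simp_all <;> omega

-- at each length at most one majority prefix
lemma pv_uniq (keys : List String) (p q : String)
    (hl : p.toList.length = q.toList.length) (hne : p ≠ q)
    (hp : keys.length < 2 * pvCnt keys p) (hq : keys.length < 2 * pvCnt keys q) : False := by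
  unfold pvCnt at hp hq
  have hdisj : ∀ x ∈ keys, ¬((decide (p.toList.length ≤ pvHalf x) && decide (p.toList <+: x.toList)) = true
      ∧ (decide (q.toList.length ≤ pvHalf x) && decide (q.toList <+: x.toList)) = true) := by
    intro x _ ⟨h1, h2⟩
    simp only [Bool.and_eq_true, decide_eq_true_eq] at h1 h2
    apply hne
    rw [← String.toList_inj, List.prefix_iff_eq_take.mp h1.2, List.prefix_iff_eq_take.mp h2.2, hl]
  have := pv_countP_disjoint _ _ keys hdisj
  omega

-- A's dictionary is the counter of all half-length prefixes
lemma pv_dictA (keys : List String) :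
    keys.foldl (fun d key =>
        (PySem.List.pyRange 1 (PySem.Int.floordiv (PySem.Str.len key) 2 + 1)).foldl
          (fun d i =>
            let pre := PySem.Str.slice key none (some i)
            let d := if d.contains pre then d else d.insert pre 0
            d.insert pre (d.getD pre 0 + 1)) d)
        PySem.Dict.empty
      = PySem.Dict.counter (pvAll keys) := by
  have hgetD0 : ∀ (d : PySem.Dict String Int) (k : String), d.contains k = false → d.getD k 0 = 0 := by
    intro d k h
    have h2 : d.get? k = none := by
      have := PySem.Dict.contains_eq_isSome_get? d k
      rw [h] at this
      cases hq : d.get? k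
      · rfl
      · rw [hq] at this; simp at this
    simp [PySem.Dict.getD, h2]
  have hout : (fun (d : PySem.Dict String Int) (key : String) =>
      (PySem.List.pyRange 1 (PySem.Int.floordiv (PySem.Str.len key) 2 + 1)).foldl
        (fun d i =>
          let pre := PySem.Str.slice key none (some i)
          let d := if d.contains pre then d else d.insert pre 0
          d.insert pre (d.getD pre 0 + 1)) d)
      = (fun d key => (pvPrefs key).foldl (fun d x => d.insert x (d.getD x 0 + 1)) d) := by
    funext d key
    have hfun : (fun (d : PySem.Dict String Int) (i : Int) =>
        let pre := PySem.Str.slice key none (some i)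
        let d := if d.contains pre then d else d.insert pre 0
        d.insert pre (d.getD pre 0 + 1))
        = (fun d i => d.insert (PySem.Str.slice key none (some i))
            (d.getD (PySem.Str.slice key none (some i)) 0 + 1)) := by
      funext d i
      show (if d.contains (PySem.Str.slice key none (some i)) then d
              else d.insert (PySem.Str.slice key none (some i)) 0).insert
            (PySem.Str.slice key none (some i))
            ((if d.contains (PySem.Str.slice key none (some i)) then d
              else d.insert (PySem.Str.slice key none (some i)) 0).getD
              (PySem.Str.slice key none (some i)) 0 + 1) = _
      by_cases h : d.contains (PySem.Str.slice key none (some i))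
      · rw [if_pos h]
      · rw [if_neg h, PySem.Dict.getD_insert_self, PySem.Dict.insert_insert_self,
          hgetD0 d _ (Bool.eq_false_iff.mpr h)]
    rw [hfun, pv_floordiv key]
    unfold pvPrefs
    rw [List.foldl_map]
  rw [hout]
  unfold pvAll
  rw [← List.foldl_flatMap]
  exact PySem.Dict.foldl_insert_getD_add_one_eq_counter _

-- B's per-level dictionary is the counter of the level slice list
lemma pv_dictB (keys : List String) (L : Int) :
    keys.foldl (fun d k =>
        if L ≤ PySem.Int.floordiv (PySem.Str.len k) 2 then
          let p := PySem.Str.slice k none (some L)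
          d.insert p (d.getD p 0 + 1)
        else d) PySem.Dict.empty
      = PySem.Dict.counter (pvLvl keys L) := by
  have hgen : ∀ (l : List String) (d0 : PySem.Dict String Int),
      l.foldl (fun d k =>
        if L ≤ (pvHalf k : Int) then
          d.insert (PySem.Str.slice k none (some L))
            (d.getD (PySem.Str.slice k none (some L)) 0 + 1)
        else d) d0
      = (l.filterMap (fun k =>
          if L ≤ (pvHalf k : Int) then some (PySem.Str.slice k none (some L)) else none)).foldl
          (fun d x => d.insert x (d.getD x 0 + 1)) d0 := by
    intro l
    induction l with
    | nil => intro d0; rfl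
    | cons k ks ih =>
      intro d0
      by_cases h : L ≤ (pvHalf k : Int)
      · simp only [List.foldl_cons, List.filterMap_cons, if_pos h, ih]
      · simp only [List.foldl_cons, List.filterMap_cons, if_neg h, ih]
  have hfun : (fun (d : PySem.Dict String Int) (k : String) =>
      if L ≤ PySem.Int.floordiv (PySem.Str.len k) 2 then
        let p := PySem.Str.slice k none (some L)
        d.insert p (d.getD p 0 + 1)
      else d)
      = (fun d k =>
        if L ≤ (pvHalf k : Int) then
          d.insert (PySem.Str.slice k none (some L))
            (d.getD (PySem.Str.slice k none (some L)) 0 + 1)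
        else d) := by
    funext d k
    rw [pv_floordiv k]
  rw [hfun, hgen]
  exact PySem.Dict.foldl_insert_getD_add_one_eq_counter _

lemma pv_mem_lvl (keys : List String) (L : Int) (hL : 1 ≤ L) (p : String) :
    p ∈ pvLvl keys L → p.toList.length = L.toNat := by
  intro h
  rw [pvLvl, List.mem_filterMap] at h
  obtain ⟨k, _, hk⟩ := h
  by_cases hc : L ≤ (pvHalf k : Int)
  · rw [if_pos hc] at hk
    obtain rfl := Option.some_inj.mp hk
    exact pv_slice_len k L (by omega) (by omega)
  · rw [if_neg hc] at hk; exact absurd hk (by simp)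

lemma pv_count_lvl (keys : List String) (L : Int) (hL : 1 ≤ L) (p : String)
    (hp : (p.toList.length : Int) = L) :
    (pvLvl keys L).count p = pvCnt keys p := by
  have hgen : ∀ l : List String,
      (l.filterMap (fun k =>
        if L ≤ (pvHalf k : Int) then some (PySem.Str.slice k none (some L)) else none)).count p
      = l.countP (fun k =>
          decide (L ≤ (pvHalf k : Int)) && (PySem.Str.slice k none (some L) == p)) := by
    intro l
    induction l with
    | nil => rfl
    | cons k ks ih =>
      by_cases h : L ≤ (pvHalf k : Int)
      · simp only [List.filterMap_cons, if_pos h, List.countP_cons, ih, List.count_cons]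
        by_cases he : PySem.Str.slice k none (some L) = p
        · simp [he, h]
        · simp [he]
      · simp only [List.filterMap_cons, if_neg h, List.countP_cons, ih]
        simp only [h, decide_false, Bool.false_and, if_neg (Bool.false_ne_true)]
        omega
  rw [pvLvl, hgen]
  unfold pvCnt
  apply List.countP_congr
  intro k _
  simp only [Bool.and_eq_true, decide_eq_true_eq, beq_iff_eq]
  constructor
  · rintro ⟨h1, h2⟩
    have hlen : p.toList.length ≤ pvHalf k := by omega
    refine ⟨hlen, ?_⟩
    rw [← h2, pv_slice_toList k L (by omega)]
    exact List.take_prefix _ _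
  · rintro ⟨h1, h2⟩
    have hhk : L ≤ (pvHalf k : Int) := by omega
    refine ⟨hhk, ?_⟩
    rw [← String.toList_inj, pv_slice_toList k L (by omega)]
    have : L.toNat = p.toList.length := by omega
    rw [this]
    exact (List.prefix_iff_eq_take.mp h2).symm

lemma pv_mem_lvl_of (keys : List String) (L : Int) (hL : 1 ≤ L) (p : String)
    (hp : (p.toList.length : Int) = L) (hc : 1 ≤ pvCnt keys p) :
    p ∈ pvLvl keys L := by
  unfold pvCnt at hc
  obtain ⟨k, hk, hcond⟩ := List.countP_pos_iff.mp hc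
  simp only [Bool.and_eq_true, decide_eq_true_eq] at hcond
  rw [pvLvl, List.mem_filterMap]
  refine ⟨k, hk, ?_⟩
  rw [if_pos (by omega : L ≤ (pvHalf k : Int))]
  congr 1
  rw [← String.toList_inj, pv_slice_toList k L (by omega)]
  have : L.toNat = p.toList.length := by omega
  rw [this]
  exact (List.prefix_iff_eq_take.mp hcond.2).symm

-- the for-break over a level's items, characterised
def pvWin (keys : List String) (L : Int) : Option String :=
  match (PySem.Dict.counter (pvLvl keys L)).items.find?
      (fun pc => 2 * pc.2 > (keys.length : Int)) with
  | some pc => some pc.1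
  | none => none

lemma pv_win_some (keys : List String) (L : Int) (hL : 1 ≤ L) (p : String)
    (h : pvWin keys L = some p) :
    (p.toList.length : Int) = L ∧ keys.length < 2 * pvCnt keys p := by
  unfold pvWin at h
  cases hfind : ((PySem.Dict.counter (pvLvl keys L)).items.find?
      (fun pc => 2 * pc.2 > (keys.length : Int))) with
  | none => rw [hfind] at h; exact absurd h (by simp)
  | some pc =>
    rw [hfind] at h
    obtain rfl := Option.some_inj.mp h
    have hpred := List.find?_some hfind
    have hmem := List.mem_of_find?_eq_some hfind
    rw [PySem.Dict.items_counter, List.mem_map] at hmem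
    obtain ⟨x, hxS, rfl⟩ := hmem
    have hxlvl : x ∈ pvLvl keys L := (PySem.Set.mem_ofList _ _).mp hxS
    have hlen : x.toList.length = L.toNat := pv_mem_lvl keys L hL x hxlvl
    have hlenI : (x.toList.length : Int) = L := by omega
    have hcnt : (pvLvl keys L).count x = pvCnt keys x := pv_count_lvl keys L hL x hlenI
    simp only [gt_iff_lt, decide_eq_true_eq] at hpred
    rw [hcnt] at hpred
    exact ⟨hlenI, by exact_mod_cast hpred⟩

lemma pv_win_ne_none (keys : List String) (L : Int) (hL : 1 ≤ L) (q : String)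
    (hq : (q.toList.length : Int) = L) (hmaj : keys.length < 2 * pvCnt keys q)
    (hn : 1 ≤ keys.length) :
    pvWin keys L = some q := by
  have hcq : 1 ≤ pvCnt keys q := by omega
  have hqlvl : q ∈ pvLvl keys L := pv_mem_lvl_of keys L hL q hq hcq
  have hqS : q ∈ PySem.Set.ofList (pvLvl keys L) := (PySem.Set.mem_ofList _ _).mpr hqlvl
  have hqitem : (q, ((pvLvl keys L).count q : Int))
      ∈ (PySem.Dict.counter (pvLvl keys L)).items := by
    rw [PySem.Dict.items_counter, List.mem_map]
    exact ⟨q, hqS, rfl⟩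
  cases hfind : ((PySem.Dict.counter (pvLvl keys L)).items.find?
      (fun pc => 2 * pc.2 > (keys.length : Int))) with
  | none =>
    have hnone := List.find?_eq_none.mp hfind _ hqitem
    simp only [gt_iff_lt, decide_eq_true_eq] at hnone
    rw [pv_count_lvl keys L hL q hq] at hnone
    exact absurd (by exact_mod_cast hmaj) hnone
  | some pc =>
    have hwin : pvWin keys L = some pc.1 := by unfold pvWin; rw [hfind]
    obtain ⟨hlen, hmajp⟩ := pv_win_some keys L hL pc.1 hwin
    rcases eq_or_ne pc.1 q with h | h
    · rw [hwin, h]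
    · exact absurd (pv_uniq keys pc.1 q (by omega) h hmajp hmaj) not_false

-- the outer fold keeps the winner of the last level that has one
lemma pv_foldl_last {f : Int → Option String} (ls : List Int) (b0 : Option String) :
    ls.foldl (fun b L => match f L with | some p => some p | none => b) b0
      = (ls.reverse.findSome? f).or b0 := by
  induction ls generalizing b0 with
  | nil => simp
  | cons x xs ih =>
    simp only [List.foldl_cons, List.reverse_cons, List.findSome?_append, ih, Option.or_assoc]
    congr 1
    cases hfx : f x <;> simp [List.findSome?, hfx, Option.or]

-- A's common-prefix list
lemma pv_common (keys : List String) :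
    ((PySem.Dict.counter (pvAll keys)).items.filter
        (fun pc => 2 * pc.2 > (keys.length : Int))).map (fun pc => pc.1)
      = (PySem.Set.ofList (pvAll keys)).filter
          (fun p => 2 * ((pvAll keys).count p : Int) > (keys.length : Int)) := by
  rw [PySem.Dict.items_counter, List.filter_map, List.map_map]
  simp only [Function.comp_def]
  exact List.map_id _


-- B's level loop, rephrased through pvWin
lemma pv_bestB (keys : List String) (maxL : Int) :
    (PySem.List.pyRange 1 (maxL + 1)).foldl (fun best level =>
        match (keys.foldl (fun d k =>
            if level ≤ PySem.Int.floordiv (PySem.Str.len k) 2 then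
              (d.insert (PySem.Str.slice k none (some level))
                (d.getD (PySem.Str.slice k none (some level)) 0 + 1))
            else d) PySem.Dict.empty).items.find?
            (fun pc => 2 * pc.2 > (keys.length : Int)) with
        | some pc => some pc.1
        | none => best) none
      = (PySem.List.pyRange 1 (maxL + 1)).reverse.findSome? (pvWin keys) := by
  have hfun : (fun (best : Option String) (level : Int) =>
      match (keys.foldl (fun d k =>
          if level ≤ PySem.Int.floordiv (PySem.Str.len k) 2 then
            (d.insert (PySem.Str.slice k none (some level))
              (d.getD (PySem.Str.slice k none (some level)) 0 + 1))
          else d) PySem.Dict.empty).items.find?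
          (fun pc => 2 * pc.2 > (keys.length : Int)) with
      | some pc => some pc.1
      | none => best)
      = (fun best level => match pvWin keys level with | some p => some p | none => best) := by
    funext best level
    rw [pv_dictB keys level]
    unfold pvWin
    cases h : ((PySem.Dict.counter (pvLvl keys level)).items.find?
        (fun pc => 2 * pc.2 > (keys.length : Int))) <;> simp only [h]
  rw [hfun, pv_foldl_last, Option.or_none]

-- ===== VERDICT (by name: the statement is the Claim_ definition above) =====
theorem detect_naming_pattern_py_spec : Claim_equal_detect_naming_pattern_py := by
  intro keys _
  unfold Spec_detect_naming_pattern_py detect_naming_pattern_py detect_naming_pattern_py_alt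
  by_cases h1 : keys = []
  · simp [h1]
  · by_cases h2 : (keys.all fun k => PySem.Str.strIsdigit k) = true
    · simp only [if_neg h1, if_pos h2]
    · simp only [if_neg h1, if_neg h2]
      rw [pv_dictA keys]
      rw [pv_common keys]
      rw [pv_bestB keys]
      have hn : 0 < keys.length := List.length_pos_iff.mpr h1
      have hSlen : ∀ p ∈ PySem.Set.ofList (pvAll keys), 1 ≤ p.toList.length := by
        intro p hp
        obtain ⟨k, _, hk⟩ := List.mem_flatMap.mp ((PySem.Set.mem_ofList _ _).mp hp)
        exact ((pv_mem_prefs k p).mp hk).1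
      have hfilt : ∀ p : String,
          p ∈ List.filter (fun p => decide (2 * ((pvAll keys).count p : Int) > (keys.length : Int)))
              (PySem.Set.ofList (pvAll keys))
            ↔ (p ∈ PySem.Set.ofList (pvAll keys) ∧ keys.length < 2 * pvCnt keys p) := by
        intro p
        rw [List.mem_filter]
        constructor
        · rintro ⟨hmem, hpred⟩
          simp only [gt_iff_lt, decide_eq_true_eq] at hpred
          rw [pv_count_all keys p (hSlen p hmem)] at hpred
          exact ⟨hmem, by exact_mod_cast hpred⟩
        · rintro ⟨hmem, hmaj⟩
          refine ⟨hmem, ?_⟩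
          simp only [gt_iff_lt, decide_eq_true_eq]
          rw [pv_count_all keys p (hSlen p hmem)]
          exact_mod_cast hmaj
      by_cases hco : List.filter (fun p => decide (2 * ((pvAll keys).count p : Int) > (keys.length : Int)))
          (PySem.Set.ofList (pvAll keys)) = []
      · rw [if_neg (by simp [hco])]
        have hnone : ∀ L ∈ (PySem.List.pyRange 1
            ((PySem.List.max? (List.map (fun k => PySem.Int.floordiv (PySem.Str.len k) 2) keys)
              fun x => x).getD 0 + 1)).reverse, pvWin keys L = none := by
          intro L hL
          rw [List.mem_reverse, PySem.List.mem_pyRange_one] at hL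
          cases hw : pvWin keys L with
          | none => rfl
          | some p =>
            exfalso
            obtain ⟨hlen, hmaj⟩ := pv_win_some keys L hL.1 p hw
            have hp1 : 1 ≤ p.toList.length := by omega
            have hc1 : 1 ≤ pvCnt keys p := by omega
            have hmem : p ∈ pvAll keys := (pv_mem_all keys p hp1).mpr hc1
            have : p ∈ List.filter
                (fun p => decide (2 * ((pvAll keys).count p : Int) > (keys.length : Int)))
                (PySem.Set.ofList (pvAll keys)) :=
              (hfilt p).mpr ⟨(PySem.Set.mem_ofList _ _).mpr hmem, hmaj⟩
            rw [hco] at this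
            exact absurd this (List.not_mem_nil)
        rw [List.findSome?_eq_none_iff.mpr hnone]
      · rw [if_pos hco]
        cases hmax : PySem.List.max? (List.filter
            (fun p => decide (2 * ((pvAll keys).count p : Int) > (keys.length : Int)))
            (PySem.Set.ofList (pvAll keys))) (fun p => PySem.Str.len p) with
        | none => exact absurd ((PySem.List.max?_eq_none_iff _ _).mp hmax) hco
        | some m =>
          obtain ⟨hmS, hmaj⟩ := (hfilt m).mp (PySem.List.max?_mem hmax)
          have hM1 : 1 ≤ m.toList.length := hSlen m hmS
          cases hv : PySem.List.max? (List.map (fun k => PySem.Int.floordiv (PySem.Str.len k) 2) keys)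
              (fun x => x) with
          | none =>
            have := (PySem.List.max?_eq_none_iff _ _).mp hv
            rw [List.map_eq_nil_iff] at this
            exact absurd this h1
          | some v =>
            simp only [Option.getD_some]
            have hc1 : 1 ≤ pvCnt keys m := by omega
            have hex : 0 < keys.countP
                (fun k => decide (m.toList.length ≤ pvHalf k) && decide (m.toList <+: k.toList)) := by
              unfold pvCnt at hc1; omega
            obtain ⟨k, hk, hcond⟩ := List.countP_pos_iff.mp hex
            simp only [Bool.and_eq_true, decide_eq_true_eq] at hcond
            have hkm : ((pvHalf k : Int)) ∈
                List.map (fun k => PySem.Int.floordiv (PySem.Str.len k) 2) keys :=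
              List.mem_map.mpr ⟨k, hk, pv_floordiv k⟩
            have hvk : ((pvHalf k : Int)) ≤ v := PySem.List.max?_isMax hv _ hkm
            have hMle : ((m.toList.length : Int)) ≤ v := by
              have : ((m.toList.length : Int)) ≤ ((pvHalf k : Int)) := by exact_mod_cast hcond.1
              omega
            have hsplit : PySem.List.pyRange 1 (v + 1)
                = PySem.List.pyRange 1 (m.toList.length : Int)
                  ++ ((m.toList.length : Int) :: PySem.List.pyRange ((m.toList.length : Int) + 1) (v + 1)) := by
              have hcons : PySem.List.pyRange (m.toList.length : Int) (v + 1)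
                  = (m.toList.length : Int) :: PySem.List.pyRange ((m.toList.length : Int) + 1) (v + 1) :=
                PySem.List.pyRange_one_cons (by omega)
              rw [PySem.List.pyRange_one_append 1 (m.toList.length : Int) (v + 1) (by omega) (by omega),
                hcons]
            rw [hsplit, List.reverse_append, List.reverse_cons, List.findSome?_append,
              List.findSome?_append]
            have hhi : (PySem.List.pyRange ((m.toList.length : Int) + 1) (v + 1)).reverse.findSome?
                (pvWin keys) = none := by
              apply List.findSome?_eq_none_iff.mpr
              intro L hL
              rw [List.mem_reverse, PySem.List.mem_pyRange_one] at hL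
              cases hw : pvWin keys L with
              | none => rfl
              | some p =>
                exfalso
                obtain ⟨hlen, hmajp⟩ := pv_win_some keys L (by omega) p hw
                have hp1 : 1 ≤ p.toList.length := by omega
                have hpc1 : 1 ≤ pvCnt keys p := by omega
                have hpmem : p ∈ pvAll keys := (pv_mem_all keys p hp1).mpr hpc1
                have hpf : p ∈ List.filter
                    (fun p => decide (2 * ((pvAll keys).count p : Int) > (keys.length : Int)))
                    (PySem.Set.ofList (pvAll keys)) :=
                  (hfilt p).mpr ⟨(PySem.Set.mem_ofList _ _).mpr hpmem, hmajp⟩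
                have := PySem.List.max?_isMax hmax _ hpf
                rw [PySem.Str.len_eq, PySem.Str.len_eq] at this
                omega
            have hwM : pvWin keys (m.toList.length : Int) = some m :=
              pv_win_ne_none keys (m.toList.length : Int) (by omega) m rfl hmaj hn
            rw [hhi]
            simp only [List.findSome?_cons, hwM, Option.none_or,
              Option.some_or]
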